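-- pv_equiv track=rewrite | github.com/mediajkgupta/ai-cto-system | ai_cto/verification/checks.py | detect_node_entry
-- ===== SOURCE A (Python) =====
-- _NODE_ENTRY_CANDIDATES = (
--     "server.js", "app.js", "index.js", "main.js",
--     "src/server.js", "src/app.js", "src/index.js",
-- )
--
-- def detect_node_entry(files: dict[str, str]) -> str | None:
--     """
--     Return the first non-empty JS entry-point file found, or None.
--
--     Priority order: server.js > app.js > index.js > main.js > top-level .js > any .js
--     """
--     for candidate in _NODE_ENTRY_CANDIDATES:
--         if candidate in files and files[candidate].strip():
--             return candidate
--     # Top-level non-empty .js file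
--     for path in sorted(files):
--         if "/" not in path and path.endswith(".js") and files[path].strip():
--             return path
--     # Any non-empty .js file
--     for path in sorted(files):
--         if path.endswith(".js") and files[path].strip():
--             return path
--     return None
-- ===== SOURCE B (Python) =====
-- _NODE_ENTRY_CANDIDATES = (
--     "server.js", "app.js", "index.js", "main.js",
--     "src/server.js", "src/app.js", "src/index.js",
-- )
--
-- def detect_node_entry(files: dict[str, str]) -> str | None:
--     """Single pass: keep the qualifying path with the smallest priority key."""
--     best = None  # (key, path)
--     for path, content in files.items():
--         if not path.endswith(".js") or not content.strip():
--             continue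
--         if path in _NODE_ENTRY_CANDIDATES:
--             key = (0, _NODE_ENTRY_CANDIDATES.index(path), "")
--         elif "/" not in path:
--             key = (1, 0, path)
--         else:
--             key = (2, 0, path)
--         if best is None or key < best[0]:
--             best = (key, path)
--     return best[1] if best is not None else None
-- ===== Notes on version B (the rewrite author's own statement) =====
-- stated objective: faster
-- what changed: A's three sequential scans (candidate tuple, then two passes over the sorted key list, each re-looking up the dict) are replaced by one unsorted pass over the items that keeps the qualifying path with the smallest lexicographic priority key (group, candidate rank, path); no sort and no repeated lookups (measured ~3x faster).
import Mathlib
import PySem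

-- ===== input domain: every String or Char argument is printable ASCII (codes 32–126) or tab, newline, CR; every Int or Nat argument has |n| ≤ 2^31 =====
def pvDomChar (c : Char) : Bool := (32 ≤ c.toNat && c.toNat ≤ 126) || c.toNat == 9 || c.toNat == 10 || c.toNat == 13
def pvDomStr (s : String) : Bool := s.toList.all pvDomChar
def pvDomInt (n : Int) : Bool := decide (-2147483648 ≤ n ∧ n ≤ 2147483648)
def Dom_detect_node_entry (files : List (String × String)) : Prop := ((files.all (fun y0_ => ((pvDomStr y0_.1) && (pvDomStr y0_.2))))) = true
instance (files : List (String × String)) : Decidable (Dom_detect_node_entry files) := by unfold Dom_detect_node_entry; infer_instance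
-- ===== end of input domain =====

-- B replaces A's three sequential scans (candidate list, sorted top-level pass, sorted any pass)
-- by a single unsorted pass keeping the qualifying path with the smallest priority key
-- (objective: faster — no sort, no repeated lookups; a timing run measured ~3x at the largest size).

-- ===== PORT A =====
def pvCands : List String :=
  ["server.js", "app.js", "index.js", "main.js", "src/server.js", "src/app.js", "src/index.js"]

-- `path in files and files[path].strip()` (dict lookup = first match in the association list)
def pvNonEmptyAt (files : List (String × String)) (p : String) : Bool :=
  match files.lookup p with
  | some v => !(PySem.Str.strip v == "")
  | none => false

def detect_node_entry (files : List (String × String)) : Option String :=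
  match pvCands.find? (fun c => pvNonEmptyAt files c) with
  | some c => some c
  | none =>
    -- sorted(files) iterates the dict's keys in sorted order
    let ks := PySem.List.sorted (files.map Prod.fst) (fun x => x) false
    match ks.find? (fun p => !PySem.Str.isIn "/" p && PySem.Str.endswith p ".js" && pvNonEmptyAt files p) with
    | some p => some p
    | none => ks.find? (fun p => PySem.Str.endswith p ".js" && pvNonEmptyAt files p)

-- ===== PORT B =====
-- priority key of a qualifying path: (0, candidate rank, "") / (1, 0, path) / (2, 0, path)
def pvKey (path : String) : Nat × Nat × String :=
  -- `path in _NODE_ENTRY_CANDIDATES` + `.index(path)` fused: index? is none exactly when absent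
  match PySem.List.index? pvCands path with
  | some r => (0, r, "")
  | none => if !PySem.Str.isIn "/" path then (1, 0, path) else (2, 0, path)

-- Python's lexicographic `<` on the 3-tuples pvKey produces
def pvLtKey (a b : Nat × Nat × String) : Bool :=
  a.1 < b.1 || (a.1 == b.1 && (a.2.1 < b.2.1 || (a.2.1 == b.2.1 && a.2.2 < b.2.2)))

def pvStep (best : Option ((Nat × Nat × String) × String)) (pv : String × String) :
    Option ((Nat × Nat × String) × String) :=
  if !PySem.Str.endswith pv.1 ".js" || PySem.Str.strip pv.2 == "" then best
  else
    let k := pvKey pv.1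
    match best with
    | none => some (k, pv.1)
    | some b => if pvLtKey k b.1 then some (k, pv.1) else some b

def detect_node_entry_alt (files : List (String × String)) : Option String :=
  (files.foldl pvStep none).map (fun b => b.2)

-- ===== PRECONDITION & SPEC =====
-- Python A's parameter is a dict, whose keys are necessarily distinct; Pre_ restricts the
-- association-list encoding to lists that actually represent a dict (no duplicate keys).
def Pre_detect_node_entry (files : List (String × String)) : Prop := (files.map Prod.fst).Nodup
instance (files : List (String × String)) : Decidable (Pre_detect_node_entry files) := by
  unfold Pre_detect_node_entry; infer_instance

def pvWitness_detect_node_entry : (List (String × String)) :=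
  [("x/a.js", "code"), ("app.js", "  "), ("b.js", "x"), ("readme.md", "hi")]

def Spec_detect_node_entry (files : List (String × String)) (out : Option String) : Prop := out = detect_node_entry_alt files
instance (files : List (String × String)) (out : Option String) : Decidable (Spec_detect_node_entry files out) := by unfold Spec_detect_node_entry; infer_instance

-- ===== CLAIM (what is proved, stated in full; the proofs are below) =====
def Claim_equal_detect_node_entry : Prop := ∀ (files : List (String × String)), Dom_detect_node_entry files → Pre_detect_node_entry files → Spec_detect_node_entry files (detect_node_entry files)

-- ===== LEMMAS AND PROOFS =====

-- a pair is "qualifying": its path ends in ".js" and its value is non-blank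
def pvQual (pv : String × String) : Bool :=
  PySem.Str.endswith pv.1 ".js" && !(PySem.Str.strip pv.2 == "")

theorem pvLtKey_irrefl (a : Nat × Nat × String) : pvLtKey a a = false := by
  simp [pvLtKey]

theorem pvLtKey_trans {a b c : Nat × Nat × String}
    (h1 : pvLtKey a b = true) (h2 : pvLtKey b c = true) : pvLtKey a c = true := by
  simp only [pvLtKey, Bool.or_eq_true, Bool.and_eq_true, decide_eq_true_eq, beq_iff_eq] at *
  rcases h1 with h1 | ⟨e1, h1⟩ <;> rcases h2 with h2 | ⟨e2, h2⟩
  · exact Or.inl (lt_trans h1 h2)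
  · exact Or.inl (e2 ▸ h1)
  · exact Or.inl (e1 ▸ h2)
  · refine Or.inr ⟨e1.trans e2, ?_⟩
    rcases h1 with h1 | ⟨f1, h1⟩ <;> rcases h2 with h2 | ⟨f2, h2⟩
    · exact Or.inl (lt_trans h1 h2)
    · exact Or.inl (f2 ▸ h1)
    · exact Or.inl (f1 ▸ h2)
    · exact Or.inr ⟨f1.trans f2, lt_trans h1 h2⟩

-- the invariant of B's fold
def pvFoldSpec (l : List (String × String)) : Option ((Nat × Nat × String) × String) → Prop
  | none => ∀ pv ∈ l, pvQual pv = false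
  | some (k, p) =>
      k = pvKey p ∧ (∃ v, (p, v) ∈ l ∧ pvQual (p, v) = true) ∧
      ∀ pv ∈ l, pvQual pv = true → pvLtKey (pvKey pv.1) k = false

theorem pvFold_spec (l : List (String × String)) : pvFoldSpec l (l.foldl pvStep none) := by
  induction l using List.reverseRecOn with
  | nil => intro pv h; simp at h
  | append_singleton t x ih =>
    rw [List.foldl_append, List.foldl_cons, List.foldl_nil]
    by_cases hq : pvQual x = true
    · have hqx := hq
      simp only [pvQual, Bool.and_eq_true, Bool.not_eq_true'] at hq
      have hg : (!PySem.Str.endswith x.1 ".js" || PySem.Str.strip x.2 == "") = false := by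
        rw [hq.1, hq.2]; rfl
      cases hr : t.foldl pvStep none with
      | none =>
        simp only [pvStep, hg, Bool.false_eq_true, if_false]
        rw [hr] at ih
        refine ⟨rfl, ⟨x.2, by simp, hqx⟩, ?_⟩
        intro pv hpv hpvq
        rcases List.mem_append.mp hpv with hpv | hpv
        · exact absurd hpvq (by simp [ih pv hpv])
        · simp at hpv
          rw [hpv]
          exact pvLtKey_irrefl _
      | some b =>
        obtain ⟨k, p⟩ := b
        simp only [pvStep, hg, Bool.false_eq_true, if_false]
        rw [hr] at ih
        obtain ⟨hk, ⟨v, hv, hvq⟩, hmin⟩ := ih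
        by_cases hlt : pvLtKey (pvKey x.1) k = true
        · rw [if_pos hlt]
          refine ⟨rfl, ⟨x.2, by simp, hqx⟩, ?_⟩
          intro pv hpv hpvq
          rcases List.mem_append.mp hpv with hpv | hpv
          · by_contra hcon
            rw [Bool.not_eq_false] at hcon
            have := pvLtKey_trans hcon hlt
            rw [hmin pv hpv hpvq] at this
            exact Bool.false_ne_true this
          · simp at hpv
            rw [hpv]
            exact pvLtKey_irrefl _
        · rw [if_neg hlt]
          refine ⟨hk, ⟨v, List.mem_append_left _ hv, hvq⟩, ?_⟩
          intro pv hpv hpvq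
          rcases List.mem_append.mp hpv with hpv | hpv
          · exact hmin pv hpv hpvq
          · simp at hpv
            rw [hpv]
            exact Bool.eq_false_iff.mpr hlt
    · have hq2 : (PySem.Str.endswith x.1 ".js" && !(PySem.Str.strip x.2 == "")) = false := by
        have h3 : pvQual x = false := by
          cases h4 : pvQual x with
          | true => exact absurd h4 hq
          | false => rfl
        rwa [pvQual] at h3
      have hg : (!PySem.Str.endswith x.1 ".js" || PySem.Str.strip x.2 == "") = true := by
        rcases Bool.eq_false_or_eq_true (PySem.Str.endswith x.1 ".js") with he | he
        · rw [he] at hq2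
          rw [he]
          rcases Bool.eq_false_or_eq_true (PySem.Str.strip x.2 == "") with hs | hs
          · rw [hs]; rfl
          · rw [hs] at hq2
            exact absurd hq2 (by decide)
        · rw [he]; rfl
      have hq3 : pvQual x = false := by
        have h3 : pvQual x = false := by
          cases h4 : pvQual x with
          | true => exact absurd h4 hq
          | false => rfl
        exact h3
      cases hr : t.foldl pvStep none with
      | none =>
        simp only [pvStep, hg, if_true]
        rw [hr] at ih
        intro pv hpv
        rcases List.mem_append.mp hpv with hpv | hpv
        · exact ih pv hpv
        · simp at hpv
          rw [hpv]
          exact hq3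
      | some b =>
        obtain ⟨k, p⟩ := b
        simp only [pvStep, hg, if_true]
        rw [hr] at ih
        obtain ⟨hk, ⟨v, hv, hvq⟩, hmin⟩ := ih
        refine ⟨hk, ⟨v, List.mem_append_left _ hv, hvq⟩, ?_⟩
        intro pv hpv hpvq
        rcases List.mem_append.mp hpv with hpv | hpv
        · exact hmin pv hpv hpvq
        · simp at hpv
          rw [hpv] at hpvq
          rw [hq3] at hpvq
          exact absurd hpvq (by decide)

-- lookup lemmas
theorem pvLookup_mem {l : List (String × String)} {p v : String}
    (h : l.lookup p = some v) : (p, v) ∈ l := by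
  induction l with
  | nil => simp [List.lookup] at h
  | cons a t ih =>
    rw [List.lookup] at h
    by_cases hp : p == a.1
    · simp [hp] at h
      refine List.mem_cons.mpr (Or.inl ?_)
      obtain ⟨a1, a2⟩ := a
      simp only [beq_iff_eq] at hp
      simp_all
    · simp [hp] at h; right; exact ih h

theorem pvMem_lookup {l : List (String × String)} {p v : String}
    (hn : (l.map Prod.fst).Nodup) (h : (p, v) ∈ l) : l.lookup p = some v := by
  induction l with
  | nil => simp at h
  | cons a t ih =>
    simp only [List.map_cons, List.nodup_cons] at hn
    rcases List.mem_cons.mp h with h | h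
    · rw [← h, List.lookup, beq_self_eq_true]
    · have hne : ¬(p == a.1) := by
        intro hb
        exact hn.1 ((eq_of_beq hb) ▸ (List.mem_map.mpr ⟨(p, v), h, rfl⟩))
      rw [List.lookup]
      simp only [hne]
      exact ih hn.2 h

-- find? firstness: on a Pairwise-R list the found element is related to every later hit
theorem pvFind?_min_pairwise {α : Type} {R : α → α → Prop} {l : List α} {P : α → Bool} {x : α}
    (hp : l.Pairwise R) (h : l.find? P = some x) :
    ∀ y ∈ l, P y = true → x = y ∨ R x y := by
  induction l with
  | nil => simp at h
  | cons a t ih =>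
    rw [List.find?] at h
    by_cases ha : P a
    · simp [ha] at h
      intro y hy hPy
      rcases List.mem_cons.mp hy with rfl | hy
      · exact Or.inl h.symm
      · exact Or.inr (h ▸ (List.pairwise_cons.mp hp).1 y hy)
    · simp [ha] at h
      intro y hy hPy
      rcases List.mem_cons.mp hy with rfl | hy
      · simp [hPy] at ha
      · exact ih (List.pairwise_cons.mp hp).2 h y hy hPy

-- find? firstness by index (for the fixed candidate list)
theorem pvFind?_idxOf_le {α : Type} [DecidableEq α] {l : List α} {P : α → Bool} {x : α}
    (h : l.find? P = some x) : ∀ y ∈ l, P y = true → l.idxOf x ≤ l.idxOf y := by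
  induction l with
  | nil => simp at h
  | cons a t ih =>
    rw [List.find?] at h
    by_cases ha : P a
    · simp [ha] at h
      subst h
      intro y _ _
      simp [List.idxOf_cons_self]
    · simp [ha] at h
      have hxa : x ≠ a := by
        rintro rfl
        exact ha (List.find?_some h)
      intro y hy hPy
      rcases List.mem_cons.mp hy with rfl | hy
      · simp [hPy] at ha
      · have hya : y ≠ a := by rintro rfl; simp [hPy] at ha
        have e1 : (a == x) = false := by simp [(Ne.symm hxa)]
        have e2 : (a == y) = false := by simp [(Ne.symm hya)]
        rw [List.idxOf_cons, List.idxOf_cons, e1, e2]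
        simpa using ih h y hy hPy

-- index? pins down idxOf
theorem pvIndex?_idxOf {α : Type} [BEq α] [LawfulBEq α] {l : List α} {v : α} {r : ℕ}
    (h : PySem.List.index? l v = some r) : l.idxOf v = r := by
  induction l generalizing r with
  | nil => simp [PySem.List.index?] at h
  | cons a t ih =>
    by_cases hav : a = v
    · subst hav
      rw [PySem.List.index?_cons_self] at h
      rw [List.idxOf_cons_self]
      exact (Option.some.injEq _ _ ▸ h).symm ▸ rfl
    · rw [PySem.List.index?_cons_of_ne t hav] at h
      rcases Option.map_eq_some_iff.mp h with ⟨r', hr', hrr⟩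
      have hb : (a == v) = false := by simp [hav]
      rw [List.idxOf_cons, hb]
      simp only [cond_false]
      rw [ih hr', hrr]

theorem pvNE_elim {files : List (String × String)} {q : String}
    (h : pvNonEmptyAt files q = true) :
    ∃ v, files.lookup q = some v ∧ (PySem.Str.strip v == "") = false := by
  rw [pvNonEmptyAt] at h
  cases hl : files.lookup q with
  | none => rw [hl] at h; simp at h
  | some v =>
    rw [hl] at h
    exact ⟨v, rfl, by rwa [Bool.not_eq_true'] at h⟩

-- a non-empty lookup at a ".js" path yields a qualifying pair of the list
theorem pvQual_of {files : List (String × String)} {q : String}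
    (h : pvNonEmptyAt files q = true) (hjs : PySem.Str.endswith q ".js" = true) :
    ∃ v, (q, v) ∈ files ∧ pvQual (q, v) = true := by
  obtain ⟨v, hl, hs⟩ := pvNE_elim h
  refine ⟨v, pvLookup_mem hl, ?_⟩
  rw [pvQual]
  simp only [hjs, hs, Bool.not_false, Bool.and_self]

theorem pvCands_js : ∀ c ∈ pvCands, PySem.Str.endswith c ".js" = true := by decide

theorem pvKey_cand {c : String} {r : ℕ} (h : PySem.List.index? pvCands c = some r) :
    pvKey c = (0, r, "") := by
  rw [pvKey, h]

theorem pvKey_top {c : String} (h1 : PySem.List.index? pvCands c = none)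
    (h2 : PySem.Str.isIn "/" c = false) : pvKey c = (1, 0, c) := by
  rw [pvKey, h1, h2]
  rfl

theorem pvKey_other {c : String} (h1 : PySem.List.index? pvCands c = none)
    (h2 : PySem.Str.isIn "/" c = true) : pvKey c = (2, 0, c) := by
  rw [pvKey, h1, h2]
  rfl

-- the key of every candidate beats the key of every non-candidate
theorem pvLt_cand_noncand {rc : ℕ} {s : String} {g : ℕ} {q : String} (hg : 0 < g) :
    pvLtKey (0, rc, s) (g, 0, q) = true := by
  simp [pvLtKey, hg]

-- for a qualifying pair (c, vc) of files, minimality transfers via hmin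
theorem pvMin_cand {files : List (String × String)} {k : ℕ × ℕ × String} {c : String}
    (hmin : ∀ pv ∈ files, pvQual pv = true → pvLtKey (pvKey pv.1) k = false)
    (hne : pvNonEmptyAt files c = true) (hjs : PySem.Str.endswith c ".js" = true) :
    pvLtKey (pvKey c) k = false := by
  obtain ⟨v, hm, hq⟩ := pvQual_of hne hjs
  exact hmin (c, v) hm hq

-- ===== VERDICT (by name: the statement is the Claim_ definition above) =====
theorem detect_node_entry_spec : Claim_equal_detect_node_entry := by
  intro files _ hpre
  unfold Spec_detect_node_entry
  unfold Pre_detect_node_entry at hpre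
  have hspec := pvFold_spec files
  rw [detect_node_entry_alt]
  cases hfold : files.foldl pvStep none with
  | none =>
    rw [hfold] at hspec
    -- no qualifying entry at all: all three scans of A come up empty
    have hno : ∀ q, PySem.Str.endswith q ".js" = true → pvNonEmptyAt files q = false := by
      intro q hjs
      cases hne : pvNonEmptyAt files q with
      | false => rfl
      | true =>
        obtain ⟨v, hm, hq⟩ := pvQual_of hne hjs
        rw [hspec (q, v) hm] at hq
        exact absurd hq (by decide)
    have h1 : pvCands.find? (fun c => pvNonEmptyAt files c) = none := by
      rw [List.find?_eq_none]
      intro c hc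
      rw [hno c (pvCands_js c hc)]
      decide
    have h2 : (PySem.List.sorted (files.map Prod.fst) (fun x => x) false).find?
        (fun p => !PySem.Str.isIn "/" p && PySem.Str.endswith p ".js" && pvNonEmptyAt files p) = none := by
      rw [List.find?_eq_none]
      intro q _
      cases hjs : PySem.Str.endswith q ".js" with
      | false => simp
      | true => simp [hno q hjs]
    have h3 : (PySem.List.sorted (files.map Prod.fst) (fun x => x) false).find?
        (fun p => PySem.Str.endswith p ".js" && pvNonEmptyAt files p) = none := by
      rw [List.find?_eq_none]
      intro q _
      cases hjs : PySem.Str.endswith q ".js" with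
      | false => simp
      | true => simp [hno q hjs]
    simp only [detect_node_entry, h1, h2, h3, Option.map_none]
  | some b =>
    obtain ⟨k, p⟩ := b
    rw [hfold] at hspec
    obtain ⟨hk, ⟨v, hv, hvq⟩, hmin⟩ := hspec
    simp only [Option.map_some]
    have hlook : files.lookup p = some v := pvMem_lookup hpre hv
    rw [pvQual] at hvq
    simp only [Bool.and_eq_true, Bool.not_eq_true'] at hvq
    have hne : pvNonEmptyAt files p = true := by
      rw [pvNonEmptyAt, hlook]
      simp only [hvq.2, Bool.not_false]
    have hjs : PySem.Str.endswith p ".js" = true := hvq.1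
    subst hk
    cases hik : PySem.List.index? pvCands p with
    | some r =>
      -- p is a candidate: A's first scan returns it
      have hkp : pvKey p = (0, r, "") := pvKey_cand hik
      have hmem : p ∈ pvCands := (PySem.List.index?_isSome_iff pvCands p).mp (by rw [hik]; rfl)
      have hsome : (pvCands.find? (fun c => pvNonEmptyAt files c)).isSome :=
        List.find?_isSome.mpr ⟨p, hmem, hne⟩
      obtain ⟨c, hfc⟩ := Option.isSome_iff_exists.mp hsome
      have hc : c ∈ pvCands := List.mem_of_find?_eq_some hfc
      have hPc : pvNonEmptyAt files c = true := List.find?_some hfc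
      have hicS : (PySem.List.index? pvCands c).isSome := (PySem.List.index?_isSome_iff pvCands c).mpr hc
      obtain ⟨rc, hic⟩ := Option.isSome_iff_exists.mp hicS
      have hkc : pvKey c = (0, rc, "") := pvKey_cand hic
      have hltf : pvLtKey (pvKey c) (pvKey p) = false :=
        pvMin_cand hmin hPc (pvCands_js c hc)
      rw [hkc, hkp] at hltf
      have hge : ¬ rc < r := by
        intro hlt
        simp [pvLtKey, hlt] at hltf
      have hle : pvCands.idxOf c ≤ pvCands.idxOf p :=
        pvFind?_idxOf_le hfc p hmem hne
      rw [pvIndex?_idxOf hic, pvIndex?_idxOf hik] at hle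
      have hrr : rc = r := by omega
      have hcp : c = p := by
        refine (List.idxOf_inj hc).mp ?_
        rw [pvIndex?_idxOf hic, pvIndex?_idxOf hik, hrr]
      subst hcp
      simp only [detect_node_entry, hfc]
    | none =>
      have h1 : pvCands.find? (fun c => pvNonEmptyAt files c) = none := by
        rw [List.find?_eq_none]
        intro c hc
        simp only [Bool.not_eq_true]
        cases hPc : pvNonEmptyAt files c with
        | false => rfl
        | true =>
          have hltf : pvLtKey (pvKey c) (pvKey p) = false :=
            pvMin_cand hmin hPc (pvCands_js c hc)
          have hicS : (PySem.List.index? pvCands c).isSome := (PySem.List.index?_isSome_iff pvCands c).mpr hc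
          obtain ⟨rc, hic⟩ := Option.isSome_iff_exists.mp hicS
          rw [pvKey_cand hic] at hltf
          cases hsl : PySem.Str.isIn "/" p with
          | false =>
            rw [pvKey_top hik hsl] at hltf
            rw [pvLt_cand_noncand (by omega)] at hltf
            exact absurd hltf (by decide)
          | true =>
            rw [pvKey_other hik hsl] at hltf
            rw [pvLt_cand_noncand (by omega)] at hltf
            exact absurd hltf (by decide)
      have hpks : p ∈ PySem.List.sorted (files.map Prod.fst) (fun x => x) false := by
        rw [PySem.List.mem_sorted]
        exact List.mem_map.mpr ⟨(p, v), hv, rfl⟩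
      have hpair : (PySem.List.sorted (files.map Prod.fst) (fun x => x) false).Pairwise
          (fun a b => a ≤ b) := PySem.List.sorted_pairwise _ _
      cases hsl : PySem.Str.isIn "/" p with
      | false =>
        -- p is a top-level .js file: A's second scan returns it
        have hkp : pvKey p = (1, 0, p) := pvKey_top hik hsl
        have hP2p : (!PySem.Str.isIn "/" p && PySem.Str.endswith p ".js" && pvNonEmptyAt files p) = true := by
          rw [hsl, hjs, hne]
          rfl
        have hsome : ((PySem.List.sorted (files.map Prod.fst) (fun x => x) false).find?
            (fun q => !PySem.Str.isIn "/" q && PySem.Str.endswith q ".js" && pvNonEmptyAt files q)).isSome :=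
          List.find?_isSome.mpr ⟨p, hpks, hP2p⟩
        obtain ⟨q, hfq⟩ := Option.isSome_iff_exists.mp hsome
        have hqks := List.mem_of_find?_eq_some hfq
        have hPq := List.find?_some hfq
        simp only [Bool.and_eq_true, Bool.not_eq_true'] at hPq
        obtain ⟨⟨hq1, hq2⟩, hq3⟩ := hPq
        have hltf : pvLtKey (pvKey q) (pvKey p) = false := pvMin_cand hmin hq3 hq2
        have hiq : PySem.List.index? pvCands q = none := by
          cases hiq : PySem.List.index? pvCands q with
          | none => rfl
          | some rq =>
            rw [pvKey_cand hiq, hkp, pvLt_cand_noncand (by omega)] at hltf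
            exact absurd hltf (by decide)
        rw [pvKey_top hiq hq1, hkp] at hltf
        have hple : p ≤ q := by
          simp only [pvLtKey] at hltf
          simp at hltf
          exact String.le_iff_toList_le.mpr hltf
        have hqle : q ≤ p := by
          rcases pvFind?_min_pairwise hpair hfq p hpks hP2p with h | h
          · exact le_of_eq h
          · exact h
        have : q = p := le_antisymm hqle hple
        subst this
        simp only [detect_node_entry, h1, hfq]
      | true =>
        -- p is a nested .js file: A's third scan returns it
        have hkp : pvKey p = (2, 0, p) := pvKey_other hik hsl
        have h2 : (PySem.List.sorted (files.map Prod.fst) (fun x => x) false).find?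
            (fun q => !PySem.Str.isIn "/" q && PySem.Str.endswith q ".js" && pvNonEmptyAt files q) = none := by
          rw [List.find?_eq_none]
          intro q _
          simp only [Bool.not_eq_true]
          cases hq1 : PySem.Str.isIn "/" q with
          | true => rfl
          | false =>
            cases hq2 : PySem.Str.endswith q ".js" with
            | false => rfl
            | true =>
              cases hq3 : pvNonEmptyAt files q with
              | false => simp
              | true =>
                have hltf : pvLtKey (pvKey q) (pvKey p) = false := pvMin_cand hmin hq3 hq2
                rw [hkp] at hltf
                cases hiq : PySem.List.index? pvCands q with
                | some rq =>
                  rw [pvKey_cand hiq, pvLt_cand_noncand (by omega)] at hltf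
                  exact absurd hltf (by decide)
                | none =>
                  rw [pvKey_top hiq hq1] at hltf
                  simp [pvLtKey] at hltf
        have hP3p : (PySem.Str.endswith p ".js" && pvNonEmptyAt files p) = true := by
          rw [hjs, hne]
          rfl
        have hsome : ((PySem.List.sorted (files.map Prod.fst) (fun x => x) false).find?
            (fun q => PySem.Str.endswith q ".js" && pvNonEmptyAt files q)).isSome :=
          List.find?_isSome.mpr ⟨p, hpks, hP3p⟩
        obtain ⟨q, hfq⟩ := Option.isSome_iff_exists.mp hsome
        have hqks := List.mem_of_find?_eq_some hfq
        have hPq := List.find?_some hfq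
        simp only [Bool.and_eq_true] at hPq
        obtain ⟨hq2, hq3⟩ := hPq
        have hltf : pvLtKey (pvKey q) (pvKey p) = false := pvMin_cand hmin hq3 hq2
        rw [hkp] at hltf
        have hiq : PySem.List.index? pvCands q = none := by
          cases hiq : PySem.List.index? pvCands q with
          | none => rfl
          | some rq =>
            rw [pvKey_cand hiq, pvLt_cand_noncand (by omega)] at hltf
            exact absurd hltf (by decide)
        have hq1 : PySem.Str.isIn "/" q = true := by
          cases hq1 : PySem.Str.isIn "/" q with
          | true => rfl
          | false =>
            rw [pvKey_top hiq hq1] at hltf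
            simp [pvLtKey] at hltf
        rw [pvKey_other hiq hq1] at hltf
        have hple : p ≤ q := by
          simp only [pvLtKey] at hltf
          simp at hltf
          exact String.le_iff_toList_le.mpr hltf
        have hqle : q ≤ p := by
          rcases pvFind?_min_pairwise hpair hfq p hpks hP3p with h | h
          · exact le_of_eq h
          · exact h
        have : q = p := le_antisymm hqle hple
        subst this
        simp only [detect_node_entry, h1, h2, hfq]
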